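-- pv_equiv track=rewrite | github.com/sookyboo/steam_shortcut_py | steam_shortcut.py | _write_configset_controller_vdf
-- ===== SOURCE A (Python) =====
-- from typing import Dict, List, Tuple, Optional, Any
--
-- def _write_configset_controller_vdf(entries: Dict[str, Dict[str, str]]) -> str:
--     lines: List[str] = []
--     lines.append('"controller_config"')
--     lines.append("{")
--     for k in sorted(entries.keys(), key=lambda x: x):
--         lines.append(f'\t"{k}"')
--         lines.append("\t{")
--         inner = entries[k]
--         preferred = ["template", "workshop", "autosave", "srmAppId", "srmParserId"]
--         inner_keys: List[str] = []
--         for p in preferred: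
--             if p in inner:
--                 inner_keys.append(p)
--         for kk in sorted(inner.keys()):
--             if kk not in inner_keys:
--                 inner_keys.append(kk)
--         for kk in inner_keys:
--             vv = inner[kk]
--             lines.append(f'\t\t"{kk}"\t\t"{vv}"')
--         lines.append("\t}")
--     lines.append("}")
--     lines.append("")
--     return "\n".join(lines)
-- ===== SOURCE B (Python) =====
-- def _write_configset_controller_vdf(entries):
--     preferred = ["template", "workshop", "autosave", "srmAppId", "srmParserId"]
--     rank = {p: i for i, p in enumerate(preferred)}
--     lines = ['"controller_config"', "{"]
--     for k in sorted(entries.keys(), key=lambda x: x):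
--         inner = entries[k]
--         lines.append(f'\t"{k}"')
--         lines.append("\t{")
--         for kk in sorted(inner.keys(), key=lambda kk: (rank.get(kk, len(preferred)), kk)):
--             lines.append(f'\t\t"{kk}"\t\t"{inner[kk]}"')
--         lines.append("\t}")
--     lines.append("}")
--     lines.append("")
--     return "\n".join(lines)
-- ===== Notes on version B (the rewrite author's own statement) =====
-- stated objective: simpler
-- what changed: A's two inner loops that order each inner dict's keys (collect present preferred keys, then append remaining sorted keys not already collected) are replaced by a single sorted() call with the composite key (rank-in-preferred-list or len(preferred), key-string).
import Mathlib
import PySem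

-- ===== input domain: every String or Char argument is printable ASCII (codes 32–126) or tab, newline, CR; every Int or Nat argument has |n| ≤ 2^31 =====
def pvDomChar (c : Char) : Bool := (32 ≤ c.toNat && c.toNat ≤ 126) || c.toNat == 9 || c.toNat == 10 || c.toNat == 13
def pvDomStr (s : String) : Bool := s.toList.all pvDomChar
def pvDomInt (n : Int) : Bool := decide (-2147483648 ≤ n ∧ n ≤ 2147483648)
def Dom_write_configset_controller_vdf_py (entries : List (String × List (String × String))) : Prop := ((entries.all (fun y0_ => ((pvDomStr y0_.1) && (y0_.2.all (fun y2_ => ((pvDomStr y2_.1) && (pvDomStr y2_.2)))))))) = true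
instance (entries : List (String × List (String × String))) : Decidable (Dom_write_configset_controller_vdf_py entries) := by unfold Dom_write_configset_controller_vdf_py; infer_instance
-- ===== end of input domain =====

-- B replaces A's two inner key-ordering loops (preferred-present list, then remaining sorted keys) by
-- ONE sorted call with the composite key (rank-in-preferred-else-5, key); objective: simpler.

-- ===== PORT A =====
-- transliteration of _write_configset_controller_vdf (a dict is PySem.Dict built from the association list)
def write_configset_controller_vdf_py (entries : List (String × List (String × String))) : String :=
  let d := PySem.Dict.ofList (entries.map (fun p => (p.1, PySem.Dict.ofList p.2)))
  let lines : List String := ["\"controller_config\"", "{"]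
  let lines := (PySem.List.sorted d.keys (fun x => x) false).foldl (fun lines k =>
    let lines := lines ++ ["\t\"" ++ k ++ "\""]
    let lines := lines ++ ["\t{"]
    let inner := d.getD k PySem.Dict.empty
    let preferred : List String := ["template", "workshop", "autosave", "srmAppId", "srmParserId"]
    let inner_keys := preferred.foldl (fun acc p => if inner.contains p then acc ++ [p] else acc) ([] : List String)
    let inner_keys := (PySem.List.sorted inner.keys (fun x => x) false).foldl
      (fun acc kk => if kk ∈ acc then acc else acc ++ [kk]) inner_keys
    let lines := inner_keys.foldl (fun ls kk =>
      ls ++ ["\t\t\"" ++ kk ++ "\"\t\t\"" ++ inner.getD kk "" ++ "\""]) lines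
    lines ++ ["\t}"]) lines
  PySem.Str.join "\n" (lines ++ ["}"] ++ [""])

-- ===== PORT B =====
-- B-side helpers: the module-level constants of Source B's inner sort (preferred list and its rank dict)
def pvPreferred : List String := ["template", "workshop", "autosave", "srmAppId", "srmParserId"]
def pvRank : PySem.Dict String Int :=
  (PySem.List.enumerate pvPreferred 0).foldl (fun r p => r.insert p.2 p.1) PySem.Dict.empty

-- transliteration of Source B: one sorted call with Python's tuple key (rank.get(kk, 5), kk) = Lex (Int × String)
def write_configset_controller_vdf_py_alt (entries : List (String × List (String × String))) : String :=
  let d := PySem.Dict.ofList (entries.map (fun p => (p.1, PySem.Dict.ofList p.2)))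
  let lines : List String := ["\"controller_config\"", "{"]
  let lines := (PySem.List.sorted d.keys (fun x => x) false).foldl (fun lines k =>
    let inner := d.getD k PySem.Dict.empty
    let lines := lines ++ ["\t\"" ++ k ++ "\""]
    let lines := lines ++ ["\t{"]
    let lines := (PySem.List.sorted inner.keys
        (fun kk => toLex (pvRank.getD kk (pvPreferred.length : Int), kk)) false).foldl
      (fun ls kk => ls ++ ["\t\t\"" ++ kk ++ "\"\t\t\"" ++ inner.getD kk "" ++ "\""]) lines
    lines ++ ["\t}"]) lines
  PySem.Str.join "\n" (lines ++ ["}"] ++ [""])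

-- ===== PRECONDITION & SPEC =====
def Spec_write_configset_controller_vdf_py (entries : List (String × List (String × String))) (out : String) : Prop := out = write_configset_controller_vdf_py_alt entries
instance (entries : List (String × List (String × String))) (out : String) : Decidable (Spec_write_configset_controller_vdf_py entries out) := by unfold Spec_write_configset_controller_vdf_py; infer_instance

-- ===== CLAIM (what is proved, stated in full; the proofs are below) =====
def Claim_equal_write_configset_controller_vdf_py : Prop := ∀ (entries : List (String × List (String × String))), Dom_write_configset_controller_vdf_py entries → Spec_write_configset_controller_vdf_py entries (write_configset_controller_vdf_py entries)

-- ===== LEMMAS AND PROOFS =====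

-- A's second inner loop (append each sorted key not yet present) is "acc ++ (new keys)" when the scanned list has no duplicates
lemma pv_foldl_dedup (S : List String) (acc : List String) (h : S.Nodup) :
    S.foldl (fun acc kk => if kk ∈ acc then acc else acc ++ [kk]) acc
      = acc ++ S.filter (fun kk => !decide (kk ∈ acc)) := by
  induction S generalizing acc with
  | nil => simp
  | cons x t ih =>
    rcases List.nodup_cons.mp h with ⟨hx, ht⟩
    by_cases hmem : x ∈ acc
    · simp [hmem, List.foldl_cons, ih _ ht]
    · simp only [List.foldl_cons, if_neg hmem, List.filter_cons,
        decide_eq_false hmem, Bool.not_false]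
      rw [ih _ ht]
      rw [List.filter_congr (l := t)
        (show ∀ kk ∈ t, (!decide (kk ∈ acc ++ [x])) = (!decide (kk ∈ acc)) by
          intro kk hkk
          have : kk ≠ x := fun e => hx (e ▸ hkk)
          simp [List.mem_append, this])]
      simp

-- every value of a dict built by update comes from the start dict or the pair list
lemma pv_mem_values_update {ν : Type} (l : List (String × ν)) (d : PySem.Dict String ν) (w : ν)
    (hw : w ∈ (d.update l).values) : w ∈ d.values ∨ ∃ p ∈ l, w = p.2 := by
  induction l generalizing d with
  | nil => exact Or.inl hw
  | cons p t ih =>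
    have hw' : w ∈ ((d.insert p.1 p.2).update t).values := hw
    rcases ih (d.insert p.1 p.2) hw' with h | ⟨q, hq, rfl⟩
    · rcases PySem.Dict.mem_values_insert _ _ _ _ h with rfl | h
      · exact Or.inr ⟨p, List.mem_cons_self, rfl⟩
      · exact Or.inl h
    · exact Or.inr ⟨q, List.mem_cons_of_mem _ hq, rfl⟩

lemma pv_rank_eq : pvRank = PySem.Dict.mk
    [("template", 0), ("workshop", 1), ("autosave", 2), ("srmAppId", 3), ("srmParserId", 4)] := by
  decide

lemma pv_rank_lt_of_mem {a : String} (ha : a ∈ pvPreferred) :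
    pvRank.getD a (pvPreferred.length : Int) < (pvPreferred.length : Int) := by
  have : a = "template" ∨ a = "workshop" ∨ a = "autosave" ∨ a = "srmAppId" ∨ a = "srmParserId" := by
    simpa [pvPreferred] using ha
  rcases this with rfl | rfl | rfl | rfl | rfl <;> decide

lemma pv_rank_of_not_mem {a : String} (ha : a ∉ pvPreferred) :
    pvRank.getD a (pvPreferred.length : Int) = (pvPreferred.length : Int) := by
  apply PySem.Dict.getD_of_not_contains
  rw [pv_rank_eq, PySem.Dict.contains_mk]
  simp only [pvPreferred, List.mem_cons, not_or, List.not_mem_nil] at ha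
  obtain ⟨h1, h2, h3, h4, h5, -⟩ := ha
  simp [List.any_cons, Ne.symm h1, Ne.symm h2, Ne.symm h3, Ne.symm h4, Ne.symm h5]

-- the ranks of the preferred keys are strictly increasing in list order
lemma pv_pref_pairwise : List.Pairwise
    (fun a b : String => toLex (pvRank.getD a (pvPreferred.length : Int), a)
      < toLex (pvRank.getD b (pvPreferred.length : Int), b)) pvPreferred := by
  simp only [pvPreferred, List.pairwise_cons, List.mem_cons, List.not_mem_nil, or_false]
  refine ⟨?_, ?_, ?_, ?_, ?_, ?_⟩ <;>
    first
    | exact List.Pairwise.nil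
    | · intro b hb
        rcases hb with rfl | rfl | rfl | rfl | rfl <;>
          exact Prod.Lex.toLex_lt_toLex.mpr (Or.inl (by decide))

-- THE CORE FACT: A's two inner loops produce exactly B's composite-key sort of the inner keys
lemma pv_inner_keys_eq (inner : PySem.Dict String String) (h : inner.keys.Nodup) :
    PySem.List.sorted inner.keys
        (fun kk => toLex (pvRank.getD kk (pvPreferred.length : Int), kk)) false
      = (PySem.List.sorted inner.keys (fun x => x) false).foldl
          (fun acc kk => if kk ∈ acc then acc else acc ++ [kk])
          (pvPreferred.foldl (fun acc p => if inner.contains p then acc ++ [p] else acc) []) := by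
  have hpres0 : pvPreferred.foldl (fun acc p => if inner.contains p then acc ++ [p] else acc) []
      = pvPreferred.filter (fun p => inner.contains p) := by
    simpa using PySem.List.foldl_append_if (fun p => inner.contains p) id pvPreferred []
  set S := PySem.List.sorted inner.keys (fun x => x) false with hSdef
  have hSperm : S.Perm inner.keys := PySem.List.sorted_perm _ _ _
  have hSnodup : S.Nodup := hSperm.nodup_iff.mpr h
  have hSmem : ∀ x, x ∈ S ↔ x ∈ inner.keys := fun x => hSperm.mem_iff
  set pres := pvPreferred.filter (fun p => inner.contains p) with hpresdef
  have hpres_sub : ∀ x ∈ pres, x ∈ inner.keys := by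
    intro x hx
    rcases List.mem_filter.mp hx with ⟨_, hc⟩
    exact (PySem.Dict.contains_iff_mem_keys _ _).mp hc
  have hpres_pref : ∀ x ∈ pres, x ∈ pvPreferred := fun x hx => (List.mem_filter.mp hx).1
  have hrest_not_pref : ∀ x ∈ S.filter (fun kk => !decide (kk ∈ pres)), x ∉ pvPreferred := by
    intro x hx hpref
    rcases List.mem_filter.mp hx with ⟨hxS, hnp⟩
    have hxk : x ∈ inner.keys := (hSmem x).mp hxS
    have : x ∈ pres := List.mem_filter.mpr
      ⟨hpref, (PySem.Dict.contains_iff_mem_keys _ _).mpr hxk⟩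
    simp [this] at hnp
  rw [hpres0, pv_foldl_dedup _ _ hSnodup]
  apply PySem.List.sorted_eq_of_perm_of_pairwise_lt
  · -- permutation
    have hnd1 : pres.Nodup := List.Nodup.filter _ (by decide)
    have hnd2 : (S.filter (fun kk => !decide (kk ∈ pres))).Nodup := hSnodup.filter _
    have hdisj : List.Disjoint pres (S.filter (fun kk => !decide (kk ∈ pres))) := by
      intro x hx hy
      rcases List.mem_filter.mp hy with ⟨_, hnp⟩
      simp [hx] at hnp
    have hnd : (pres ++ S.filter (fun kk => !decide (kk ∈ pres))).Nodup :=
      List.nodup_append.mpr ⟨hnd1, hnd2, fun a ha b hb e => hdisj ha (e ▸ hb)⟩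
    refine (List.perm_ext_iff_of_nodup hnd h).mpr ?_
    intro a
    constructor
    · intro ha
      rcases List.mem_append.mp ha with ha | ha
      · exact hpres_sub a ha
      · exact (hSmem a).mp (List.mem_filter.mp ha).1
    · intro ha
      by_cases hp : a ∈ pres
      · exact List.mem_append.mpr (Or.inl hp)
      · exact List.mem_append.mpr (Or.inr (List.mem_filter.mpr
          ⟨(hSmem a).mpr ha, by simp [hp]⟩))
  · -- pairwise strictly increasing composite key
    rw [List.pairwise_append]
    refine ⟨?_, ?_, ?_⟩
    · exact List.Pairwise.sublist List.filter_sublist pv_pref_pairwise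
    · -- inside the remainder: all ranks are 5, string order is strict since S is sorted and nodup
      have hle : List.Pairwise (fun a b : String => a ≤ b) S := by
        simpa using PySem.List.sorted_pairwise inner.keys (fun x => x)
      have hlt : List.Pairwise (fun a b : String => a < b) S :=
        (hle.and hSnodup).imp (fun h => lt_of_le_of_ne h.1 h.2)
      have := List.Pairwise.sublist (List.filter_sublist
        (p := fun kk => !decide (kk ∈ pres))) hlt
      refine List.Pairwise.imp_of_mem ?_ this
      intro a b ha hb hab
      rw [pv_rank_of_not_mem (hrest_not_pref a ha), pv_rank_of_not_mem (hrest_not_pref b hb)]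
      exact Prod.Lex.toLex_lt_toLex.mpr (Or.inr ⟨rfl, hab⟩)
    · -- across: preferred keys rank below 5, the rest rank exactly 5
      intro a ha b hb
      have h1 := pv_rank_lt_of_mem (hpres_pref a ha)
      have h2 := pv_rank_of_not_mem (hrest_not_pref b hb)
      exact Prod.Lex.toLex_lt_toLex.mpr (Or.inl (by rw [h2]; exact h1))

-- every inner dict looked up in the outer loop has duplicate-free keys
lemma pv_inner_nodup (entries : List (String × List (String × String))) (k : String) :
    ((PySem.Dict.ofList (entries.map (fun p => (p.1, PySem.Dict.ofList p.2)))).getD k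
      PySem.Dict.empty).keys.Nodup := by
  set d := PySem.Dict.ofList (entries.map (fun p => (p.1, PySem.Dict.ofList p.2))) with hd
  rw [PySem.Dict.getD_eq_get?_getD]
  cases hg : d.get? k with
  | none => simp
  | some v =>
    have hv : v ∈ d.values := by
      have := PySem.Dict.mem_items_of_get?_eq_some d hg
      exact List.mem_map.mpr ⟨(k, v), this, rfl⟩
    have hv2 : v ∈ (PySem.Dict.empty.update
        (entries.map (fun p => (p.1, PySem.Dict.ofList p.2)))).values := by
      rw [hd] at hv; exact hv
    have := pv_mem_values_update (entries.map (fun p => (p.1, PySem.Dict.ofList p.2)))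
      PySem.Dict.empty v hv2
    rcases this with h | ⟨q, hq, rfl⟩
    · simp [PySem.Dict.empty, PySem.Dict.values] at h
    · rcases List.mem_map.mp hq with ⟨p, _, rfl⟩
      exact PySem.Dict.nodup_keys_ofList p.2

-- ===== VERDICT (by name: the statement is the Claim_ definition above) =====
theorem write_configset_controller_vdf_py_spec : Claim_equal_write_configset_controller_vdf_py := by
  intro entries _
  unfold Spec_write_configset_controller_vdf_py
  unfold write_configset_controller_vdf_py write_configset_controller_vdf_py_alt
  have hstep : (fun (lines : List String) (k : String) =>
      let d := PySem.Dict.ofList (entries.map (fun p => (p.1, PySem.Dict.ofList p.2)))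
      let lines := lines ++ ["\t\"" ++ k ++ "\""]
      let lines := lines ++ ["\t{"]
      let inner := d.getD k PySem.Dict.empty
      let preferred : List String := ["template", "workshop", "autosave", "srmAppId", "srmParserId"]
      let inner_keys := preferred.foldl (fun acc p => if inner.contains p then acc ++ [p] else acc) ([] : List String)
      let inner_keys := (PySem.List.sorted inner.keys (fun x => x) false).foldl
        (fun acc kk => if kk ∈ acc then acc else acc ++ [kk]) inner_keys
      let lines := inner_keys.foldl (fun ls kk =>
        ls ++ ["\t\t\"" ++ kk ++ "\"\t\t\"" ++ inner.getD kk "" ++ "\""]) lines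
      lines ++ ["\t}"])
      = (fun (lines : List String) (k : String) =>
      let d := PySem.Dict.ofList (entries.map (fun p => (p.1, PySem.Dict.ofList p.2)))
      let inner := d.getD k PySem.Dict.empty
      let lines := lines ++ ["\t\"" ++ k ++ "\""]
      let lines := lines ++ ["\t{"]
      let lines := (PySem.List.sorted inner.keys
          (fun kk => toLex (pvRank.getD kk (pvPreferred.length : Int), kk)) false).foldl
        (fun ls kk => ls ++ ["\t\t\"" ++ kk ++ "\"\t\t\"" ++ inner.getD kk "" ++ "\""]) lines
      lines ++ ["\t}"]) := by
    funext lines k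
    have h := pv_inner_keys_eq
      ((PySem.Dict.ofList (entries.map (fun p => (p.1, PySem.Dict.ofList p.2)))).getD k
        PySem.Dict.empty) (pv_inner_nodup entries k)
    simp only [pvPreferred] at h ⊢
    rw [← h]
  simp only [hstep]
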